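-- pv_equiv track=rewrite | github.com/Extomvi/GDGUnilag | inPython/datastructures/longest-consecutive-element.py | longest_consecutive_elements
-- ===== SOURCE A (Python) =====
-- def longest_consecutive_elements(nums):
--     seen = set(nums)
--     res = []
--     for num in nums:
--         if num-1 not in seen:
--             start = num
--             while num in seen:
--                 num += 1
--                 res.append('{}->{}'.format(start, num))
--     return res
-- ===== SOURCE B (Python) =====
-- def longest_consecutive_elements(nums):
--     # Build a run-start -> run-length table from the sorted unique values,
--     # then emit for each num in original order that is a run start.
--     uniq = sorted(set(nums))
--     runs = {}
--     while uniq: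
--         start = uniq[0]
--         c = 1
--         while c < len(uniq) and uniq[c] == start + c:
--             c += 1
--         runs[start] = c
--         uniq = uniq[c:]
--     res = []
--     for num in nums:
--         c = runs.get(num)
--         if c is not None:
--             for k in range(c):
--                 res.append('{}->{}'.format(num, num + k + 1))
--     return res
-- ===== Notes on version B (the rewrite author's own statement) =====
-- stated objective: alternative
-- what changed: Instead of walking each run element-by-element through a hash set, B sorts the unique values once, builds a run-start -> run-length table in a single sweep, and emits via one lookup pass over nums in original order.
import Mathlib
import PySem

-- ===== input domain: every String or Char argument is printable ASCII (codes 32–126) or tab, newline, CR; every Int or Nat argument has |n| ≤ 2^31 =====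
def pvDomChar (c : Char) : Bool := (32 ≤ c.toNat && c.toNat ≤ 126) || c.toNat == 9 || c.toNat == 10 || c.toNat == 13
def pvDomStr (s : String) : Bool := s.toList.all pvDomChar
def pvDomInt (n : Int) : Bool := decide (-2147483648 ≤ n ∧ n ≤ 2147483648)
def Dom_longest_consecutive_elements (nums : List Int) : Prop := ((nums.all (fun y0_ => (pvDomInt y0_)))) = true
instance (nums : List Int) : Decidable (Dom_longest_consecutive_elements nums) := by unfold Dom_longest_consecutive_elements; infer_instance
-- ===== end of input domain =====

-- B replaces A's per-start set walk by sorting the unique values once, building a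
-- run-start -> run-length table in one sweep, and a single lookup pass over nums
-- in original order (objective: alternative).

-- '{}->{}'.format(a, b) for two ints (exact: str(int) is PySem.Int.toStr)
def pvFmt (a b : Int) : String := PySem.Int.toStr a ++ "->" ++ PySem.Int.toStr b

-- ===== PORT A =====
-- the inner 'while num in seen' loop; fuel = |seen| + 1 always suffices (each true
-- iteration visits a fresh member of seen), and once 'num ∉ seen' the result is res.
def pvWalk (seen : List Int) (start num : Int) (res : List String) : Nat → List String
  | 0 => res
  | fuel + 1 =>
    if num ∈ seen then
      pvWalk seen start (num + 1) (res ++ [pvFmt start (num + 1)]) fuel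
    else res

def longest_consecutive_elements (nums : List Int) : List String :=
  let seen : PySem.Set Int := PySem.Set.ofList nums
  nums.foldl (fun res num =>
    if (num - 1) ∉ seen then pvWalk seen num num res (seen.length + 1) else res) []

-- ===== PORT B =====
-- the inner 'while c < len(uniq) and uniq[c] == start + c' counter (c = result + 1)
def pvCountRun (x : Int) : List Int → Nat
  | [] => 0
  | y :: t => if y = x + 1 then pvCountRun y t + 1 else 0

-- the outer 'while uniq:' loop: record runs[start] = c and keep uniq[c:]
def pvBuildRuns (runs : PySem.Dict Int Int) : List Int → PySem.Dict Int Int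
  | [] => runs
  | start :: t =>
      pvBuildRuns (runs.insert start ((pvCountRun start t + 1 : Nat) : Int))
        (t.drop (pvCountRun start t))
  termination_by u => u.length
  decreasing_by simp

def longest_consecutive_elements_alt (nums : List Int) : List String :=
  let uniq := PySem.List.sorted (PySem.Set.ofList nums) (fun x => x) false
  let runs := pvBuildRuns PySem.Dict.empty uniq
  nums.foldl (fun res num =>
    match runs.get? num with
    | some c => res ++ (PySem.List.pyRange 0 c 1).map (fun k => pvFmt num (num + k + 1))
    | none => res) []

-- ===== PRECONDITION & SPEC =====
def Spec_longest_consecutive_elements (nums : List Int) (out : List String) : Prop := out = longest_consecutive_elements_alt nums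
instance (nums : List Int) (out : List String) : Decidable (Spec_longest_consecutive_elements nums out) := by unfold Spec_longest_consecutive_elements; infer_instance

-- ===== CLAIM (what is proved, stated in full; the proofs are below) =====
def Claim_equal_longest_consecutive_elements : Prop := ∀ (nums : List Int), Dom_longest_consecutive_elements nums → Spec_longest_consecutive_elements nums (longest_consecutive_elements nums)

-- ===== LEMMAS AND PROOFS =====

-- t.take (pvCountRun x t) is exactly the chain x+1, x+2, …
theorem pvCountRun_take (x : Int) (t : List Int) :
    t.take (pvCountRun x t) = (List.range (pvCountRun x t)).map (fun i : Nat => x + (i : Int) + 1) := by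
  induction t generalizing x with
  | nil => simp [pvCountRun]
  | cons y t' ih =>
    by_cases h : y = x + 1
    · have h1 : pvCountRun x (y :: t') = pvCountRun y t' + 1 := by simp [pvCountRun, h]
      rw [h1, List.take_succ_cons, ih y, List.range_succ_eq_map, List.map_cons, List.map_map]
      congr 1
      · omega
      · apply List.map_congr_left; intro i _
        simp only [Function.comp_apply, h]
        push_cast; ring
    · simp [pvCountRun, if_neg h]

-- the element right after the counted chain is not x + pvCountRun x t + 1
theorem pvCountRun_drop_head (x : Int) (t : List Int) (y : Int) (r : List Int)
    (h : t.drop (pvCountRun x t) = y :: r) : y ≠ x + pvCountRun x t + 1 := by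
  induction t generalizing x y r with
  | nil => simp [pvCountRun] at h
  | cons z t' ih =>
    by_cases hz : z = x + 1
    · simp only [pvCountRun, if_pos hz, List.drop_succ_cons] at h ⊢
      have := ih z y r h
      push_cast at this
      omega
    · simp only [pvCountRun, if_neg hz, List.drop_zero] at h ⊢
      have hy : y = z := by injection h with h1 h2; omega
      subst hy
      simpa using hz

-- characterisation of the run table built from a strictly increasing list:
-- a looked-up key is a run start with its full length recorded, and a key that
-- falls through to d is either absent or has its predecessor present.
theorem pvBuildRuns_main (d : PySem.Dict Int Int) (u : List Int) :
    u.Pairwise (· < ·) → ∀ x : Int,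
    ((pvBuildRuns d u).get? x = d.get? x ∧ (x ∉ u ∨ (x - 1) ∈ u))
    ∨ (∃ c : Nat, (pvBuildRuns d u).get? x = some ((c : Int) + 1)
        ∧ (∀ i : Nat, i ≤ c → x + (i : Int) ∈ u) ∧ (x + (c : Int) + 1) ∉ u ∧ (x - 1) ∉ u ∧ x ∈ u) := by
  induction d, u using pvBuildRuns.induct with
  | case1 d => intro _ x; left; simp [pvBuildRuns]
  | case2 d start t ih =>
    intro hs x
    set c0 := pvCountRun start t with hc0
    have hstep : pvBuildRuns d (start :: t)
        = pvBuildRuns (d.insert start ((c0 + 1 : Nat) : Int)) (t.drop c0) := by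
      rw [pvBuildRuns]
    have hs1 : ∀ y ∈ t, start < y := (List.pairwise_cons.mp hs).1
    have hs2 : t.Pairwise (· < ·) := (List.pairwise_cons.mp hs).2
    have hsplit : t = t.take c0 ++ t.drop c0 := (List.take_append_drop c0 t).symm
    have htake := pvCountRun_take start t
    have hrest : (t.drop c0).Pairwise (· < ·) := hs2.sublist (List.drop_sublist c0 t)
    have hcross : ∀ a ∈ t.take c0, ∀ b ∈ t.drop c0, a < b := by
      have := hsplit ▸ hs2
      exact fun a ha b hb => ((List.pairwise_append.mp this).2.2) a ha b hb
    have htakeBound : ∀ z ∈ t.take c0, start < z ∧ z ≤ start + (c0 : Int) := by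
      intro z hz
      rw [htake] at hz
      obtain ⟨i, hi, rfl⟩ := List.mem_map.mp hz
      have := List.mem_range.mp hi
      constructor <;> [omega; (push_cast; omega)]
    have htakeMem : ∀ i : Nat, i < c0 → start + (i : Int) + 1 ∈ t.take c0 := by
      intro i hi
      rw [htake]
      exact List.mem_map.mpr ⟨i, List.mem_range.mpr hi, rfl⟩
    have hRestBig : ∀ y ∈ t.drop c0, start + (c0 : Int) + 1 < y := by
      intro y hy
      obtain ⟨y0, r, hdrop⟩ : ∃ y0 r, t.drop c0 = y0 :: r := by
        cases h : t.drop c0 with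
        | nil => rw [h] at hy; simp at hy
        | cons a b => exact ⟨a, b, rfl⟩
      have hy0t : y0 ∈ t := List.mem_of_mem_drop (hdrop ▸ List.mem_cons_self ..)
      have hy0a : start < y0 := hs1 _ hy0t
      have hy0b : y0 ≠ start + (c0 : Int) + 1 := pvCountRun_drop_head start t y0 r hdrop
      have hy0c : start + (c0 : Int) < y0 := by
        rcases Nat.eq_zero_or_pos c0 with h0 | h0
        · simp [h0] at hy0a ⊢; omega
        · have hlast : start + ((c0 - 1 : Nat) : Int) + 1 ∈ t.take c0 := htakeMem _ (by omega)
          have := hcross _ hlast y0 (hdrop ▸ List.mem_cons_self ..)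
          push_cast at this; omega
      have hy0 : start + (c0 : Int) + 1 < y0 := by omega
      rw [hdrop] at hy
      rcases List.mem_cons.mp hy with rfl | hy
      · exact hy0
      · have := (List.pairwise_cons.mp (hdrop ▸ hrest)).1 y hy
        omega
    have hmem_u : ∀ z : Int, z ∈ start :: t ↔ z = start ∨ z ∈ t.take c0 ∨ z ∈ t.drop c0 := by
      intro z
      rw [List.mem_cons]
      have h2 : z ∈ t ↔ z ∈ t.take c0 ∨ z ∈ t.drop c0 := by
        conv_lhs => rw [hsplit]
        exact List.mem_append
      rw [h2]
    rw [hstep]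
    rcases ih hrest x with ⟨hEq, hOr⟩ | ⟨c, hGet, hMem, hAfter, hPrev, hxMem⟩
    · by_cases hx : x = start
      · subst hx
        right
        refine ⟨c0, ?_, ?_, ?_, ?_, List.mem_cons_self ..⟩
        · rw [hEq, PySem.Dict.get?_insert, if_pos rfl]
          norm_cast
        · intro i hi
          rcases Nat.eq_zero_or_pos i with h0 | h0
          · simp [h0]
          · have hm := htakeMem (i - 1) (by omega)
            have he : x + (i : Int) = x + ((i - 1 : Nat) : Int) + 1 := by omega
            rw [hmem_u]
            right; left
            rw [he]
            exact hm
        · rw [hmem_u]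
          rintro (h | h | h)
          · omega
          · have := (htakeBound _ h).2; omega
          · have := hRestBig _ h; omega
        · rw [hmem_u]
          rintro (h | h | h)
          · omega
          · have := (htakeBound _ h).1; omega
          · have := hRestBig _ h; omega
      · have hEq' : (pvBuildRuns (d.insert start ((c0 + 1 : Nat) : Int)) (t.drop c0)).get? x = d.get? x := by
          rw [hEq, PySem.Dict.get?_insert, if_neg hx]
        by_cases hxt : x ∈ t.take c0
        · left
          refine ⟨hEq', Or.inr ?_⟩
          rw [htake] at hxt
          obtain ⟨i, hi, rfl⟩ := List.mem_map.mp hxt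
          rcases Nat.eq_zero_or_pos i with h0 | h0
          · subst h0
            rw [hmem_u]
            left; push_cast; ring
          · rw [hmem_u]
            right; left
            have : start + (i : Int) + 1 - 1 = start + ((i - 1 : Nat) : Int) + 1 := by omega
            rw [this]
            exact htakeMem _ (by have := List.mem_range.mp hi; omega)
        · rcases hOr with hno | hyes
          · left
            refine ⟨hEq', Or.inl ?_⟩
            rw [hmem_u]
            push Not
            exact ⟨hx, hxt, hno⟩
          · left
            refine ⟨hEq', Or.inr ?_⟩
            rw [hmem_u]
            right; right
            exact hyes
    · right
      have hxBig : start + (c0 : Int) + 1 < x := hRestBig x hxMem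
      refine ⟨c, hGet, ?_, ?_, ?_, (hmem_u x).mpr (Or.inr (Or.inr hxMem))⟩
      · intro i hi
        exact (hmem_u _).mpr (Or.inr (Or.inr (hMem i hi)))
      · rw [hmem_u]
        push Not
        refine ⟨by omega, ?_, hAfter⟩
        intro hmem
        have := (htakeBound _ hmem).2
        omega
      · rw [hmem_u]
        push Not
        refine ⟨by omega, ?_, hPrev⟩
        intro hmem
        have := (htakeBound _ hmem).2
        omega

-- pvWalk emits the rest of the run start, start+1, …, start+L-1 (all in S, start+L not)
theorem pvWalk_spec (S : List Int) (start : Int) :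
    ∀ (fuel j L : Nat) (acc : List String), j ≤ L → L - j < fuel →
    (∀ i : Nat, i < L → (start + (i : Int)) ∈ S) → (start + (L : Int)) ∉ S →
    pvWalk S start (start + (j : Int)) acc fuel
      = acc ++ (List.range (L - j)).map (fun i : Nat => pvFmt start (start + (j : Int) + (i : Int) + 1)) := by
  intro fuel
  induction fuel with
  | zero => intro j L acc h1 h2 _ _; omega
  | succ fuel ih =>
    intro j L acc h1 h2 hmem hout
    by_cases hj : j < L
    · have hin : (start + (j : Int)) ∈ S := hmem j hj
      simp only [pvWalk, if_pos hin]
      have e1 : start + (j : Int) + 1 = start + ((j + 1 : Nat) : Int) := by push_cast; ring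
      rw [e1, ih (j + 1) L (acc ++ [pvFmt start (start + ((j + 1 : Nat) : Int))])
        (by omega) (by omega) hmem hout]
      have e2 : L - j = (L - (j + 1)) + 1 := by omega
      rw [e2, List.range_succ_eq_map, List.map_cons, List.map_map, List.append_assoc]
      congr 1
      rw [List.singleton_append]
      congr 1
      · congr 1; push_cast; omega
      · apply List.map_congr_left; intro i _
        simp only [Function.comp_apply]
        congr 1
        push_cast; omega
    · have hjL : j = L := by omega
      subst hjL
      simp only [pvWalk, if_neg hout]
      simp

-- ===== VERDICT (by name: the statement is the Claim_ definition above) =====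
theorem longest_consecutive_elements_spec : Claim_equal_longest_consecutive_elements := by
  intro nums _
  unfold Spec_longest_consecutive_elements
  unfold longest_consecutive_elements longest_consecutive_elements_alt
  set S : PySem.Set Int := PySem.Set.ofList nums with hS
  set u : List Int := PySem.List.sorted S (fun x => x) false with hu
  set runs : PySem.Dict Int Int := pvBuildRuns PySem.Dict.empty u with hruns
  apply PySem.List.foldl_congr_mem
  intro acc num hnum
  have hmemS : ∀ z : Int, z ∈ S ↔ z ∈ nums := fun z => PySem.Set.mem_ofList nums z
  have hmemu : ∀ z : Int, z ∈ u ↔ z ∈ nums := fun z =>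
    (PySem.List.mem_sorted S (fun x => x) false z).trans (hmemS z)
  have hs : u.Pairwise (· < ·) := PySem.List.sorted_ofList_pairwise_lt nums
  have hlenu : u.length = S.length := PySem.List.length_sorted S (fun x => x) false
  rcases pvBuildRuns_main PySem.Dict.empty u hs num with ⟨hEq, hOr⟩ | ⟨c, hGet, hMem, hAfter, hPrev, hxMem⟩
  · -- num is not a run start: both sides leave acc unchanged
    rw [PySem.Dict.get?_empty] at hEq
    rw [hEq]
    have hprev : (num - 1) ∈ S := by
      rcases hOr with hno | hyes
      · exact absurd ((hmemu num).mpr hnum) hno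
      · exact (hmemS _).mpr ((hmemu _).mp hyes)
    rw [if_neg (by simpa using hprev)]
  · -- num starts a run of length c+1
    rw [hGet]
    have hprev : (num - 1) ∉ S := fun h => hPrev ((hmemu _).mpr ((hmemS _).mp h))
    rw [if_pos (by simpa using hprev)]
    have hfuel : c + 1 ≤ S.length := by
      have hsub : ((List.range (c + 1)).map (fun i : Nat => num + (i : Int))).Subperm u := by
        apply List.subperm_of_subset
        · apply List.Nodup.map
          · intro a b hab; simp only [add_right_inj, Nat.cast_inj] at hab; exact hab
          · exact List.nodup_range
        · intro z hz
          obtain ⟨i, hi, rfl⟩ := List.mem_map.mp hz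
          exact hMem i (by have := List.mem_range.mp hi; omega)
      have := hsub.length_le
      simpa [hlenu] using this
    have hwalk := pvWalk_spec S num (S.length + 1) 0 (c + 1) acc (by omega) (by omega)
      (fun i hi => (hmemS _).mpr ((hmemu _).mp (hMem i (by omega))))
      (by
        intro h
        apply hAfter
        have : num + ((c + 1 : Nat) : Int) = num + (c : Int) + 1 := by push_cast; ring
        rw [this] at h
        exact (hmemu _).mpr ((hmemS _).mp h))
    have e0 : num + ((0 : Nat) : Int) = num := by simp
    rw [e0] at hwalk
    rw [hwalk]
    congr 1
    rw [PySem.List.pyRange_one, List.map_map]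
    have e1 : ((c : Int) + 1 - 0).toNat = c + 1 := by omega
    rw [e1]
    simp only [Nat.sub_zero]
    apply List.map_congr_left
    intro i _
    simp only [Function.comp_apply]
    congr 1
    omega
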